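-- pv_equiv track=rewrite | github.com/gitjc05/django-shopping-cart | base/views.py | l_form
-- ===== SOURCE A (Python) =====
-- def l_form(strt):
--     nl = []
--     tmp = ""
--     incorrect = ['"', "'", ",", "[", "]", " "]
--     for x in strt:
--         if x not in incorrect:
--             tmp += x
--         if x == "]" or x == ",":
--             nl.append(tmp)
--             tmp = ""
--
--     return nl
-- ===== SOURCE B (Python) =====
-- def l_form(strt):
--     # Normalise in one comprehension (drop noise chars, unify separators to ','),
--     # then let str.split do the tokenising; the trailing unterminated piece is sliced off.
--     cleaned = ''.join(',' if c in ',]' else c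
--                       for c in strt if c not in '"\' [')
--     return cleaned.split(',')[:-1]
-- ===== Notes on version B (the rewrite author's own statement) =====
-- stated objective: faster
-- what changed: Replaced A's char-by-char accumulator state machine (quadratic-ish repeated tmp += x string appends and per-char list membership tests) with a one-pass C-level normalisation (drop noise chars, map ']' to ',') followed by a single str.split and a [:-1] slice.
import Mathlib
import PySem

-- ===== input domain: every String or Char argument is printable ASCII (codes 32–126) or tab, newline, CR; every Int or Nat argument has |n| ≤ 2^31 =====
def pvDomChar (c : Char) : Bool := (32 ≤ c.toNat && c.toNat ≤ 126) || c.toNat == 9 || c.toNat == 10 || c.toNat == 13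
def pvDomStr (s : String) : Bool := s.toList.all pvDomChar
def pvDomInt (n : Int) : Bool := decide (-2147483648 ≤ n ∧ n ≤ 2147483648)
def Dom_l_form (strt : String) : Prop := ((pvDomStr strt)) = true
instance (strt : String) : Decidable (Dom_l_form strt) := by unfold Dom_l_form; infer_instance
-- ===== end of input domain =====

-- B normalises the string in one pass (drop noise chars, unify ',' and ']' to ',') and
-- tokenises with a single split, instead of A's hand-rolled accumulator state machine.


-- ===== PORT A =====
def l_form (strt : String) : List String :=
  let incorrect : List Char := ['"', '\'', ',', '[', ']', ' ']
  (strt.toList.foldl (fun (st : List String × String) x =>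
      let tmp := if x ∈ incorrect then st.2 else st.2.push x
      if x = ']' ∨ x = ',' then (st.1 ++ [tmp], "") else (st.1, tmp))
    (([] : List String), "")).1

-- ===== PORT B =====
-- B-side helper: the one-pass comprehension "drop noise chars, unify ',' and ']' to ','"
def pvClean (cs : List Char) : List Char :=
  (cs.filter (fun c => !(c == '"' || c == '\'' || c == ' ' || c == '['))).map
    (fun c => if c == ',' || c == ']' then ',' else c)

def l_form_alt (strt : String) : List String :=
  (PySem.List.slice (PySem.Chars.splitOn (pvClean strt.toList) [',']) none (some (-1))).map
    String.ofList

-- ===== PRECONDITION & SPEC =====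
def Spec_l_form (strt : String) (out : List String) : Prop := out = l_form_alt strt
instance (strt : String) (out : List String) : Decidable (Spec_l_form strt out) := by unfold Spec_l_form; infer_instance

-- ===== CLAIM (what is proved, stated in full; the proofs are below) =====
def Claim_equal_l_form : Prop := ∀ (strt : String), Dom_l_form strt → Spec_l_form strt (l_form strt)

-- ===== LEMMAS AND PROOFS =====

-- mid-point spec: the tokens A still produces from pending buffer `tmp` and remaining input `cs`
def pvToks : List Char → List Char → List String
  | [], _ => []
  | c :: cs, tmp =>
    let tmp' := if c ∈ (['"', '\'', ',', '[', ']', ' '] : List Char) then tmp else tmp ++ [c]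
    if c = ']' ∨ c = ',' then String.ofList tmp' :: pvToks cs [] else pvToks cs tmp'

-- plain split on ','
def pvSplitC : List Char → List (List Char)
  | [] => [[]]
  | c :: cs => if c = ',' then [] :: pvSplitC cs else (pvSplitC cs).modifyHead (c :: ·)

lemma pvSplitC_ne_nil (cs : List Char) : pvSplitC cs ≠ [] := by
  cases cs with
  | nil => simp [pvSplitC]
  | cons c cs =>
    simp only [pvSplitC]
    split_ifs
    · simp
    · cases h : pvSplitC cs with
      | nil => exact absurd h (pvSplitC_ne_nil cs)
      | cons a t => simp

lemma pvPush (tmp : List Char) (c : Char) :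
    (String.ofList tmp).push c = String.ofList (tmp ++ [c]) := by
  rw [← String.ofList_toList (s := (String.ofList tmp).push c), String.toList_push,
    String.toList_ofList]

lemma pvA_fold (cs : List Char) (nl : List String) (tmp : List Char) :
    (cs.foldl (fun (st : List String × String) x =>
      let t := if x ∈ (['"', '\'', ',', '[', ']', ' '] : List Char) then st.2 else st.2.push x
      if x = ']' ∨ x = ',' then (st.1 ++ [t], "") else (st.1, t))
      (nl, String.ofList tmp)).1 = nl ++ pvToks cs tmp := by
  induction cs generalizing nl tmp with
  | nil => simp [pvToks]
  | cons c cs ih =>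
    simp only [List.foldl_cons, pvToks]
    by_cases hm : c ∈ (['"', '\'', ',', '[', ']', ' '] : List Char)
    · by_cases hs : c = ']' ∨ c = ','
      · have := ih (nl ++ [String.ofList tmp]) []
        rw [show (String.ofList [] : String) = "" from rfl] at this
        simpa [hm, hs] using this
      · simpa [hm, hs] using ih nl tmp
    · have hs : ¬ (c = ']' ∨ c = ',') := by
        intro h; rcases h with h | h <;> simp [h] at hm
      simpa [hm, hs, pvPush] using ih nl (tmp ++ [c])

lemma pvSplitC_append_no_comma (pre cs : List Char) (h : ',' ∉ pre) :
    pvSplitC (pre ++ cs) = (pvSplitC cs).modifyHead (pre ++ ·) := by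
  induction pre with
  | nil =>
    cases hc : pvSplitC cs with
    | nil => exact absurd hc (pvSplitC_ne_nil cs)
    | cons a t => simp [hc]
  | cons p pre ih =>
    have hp : p ≠ ',' := by intro h'; exact h (by simp [h'])
    have hpre : ',' ∉ pre := by intro h'; exact h (by simp [h'])
    cases hc : pvSplitC cs with
    | nil => exact absurd hc (pvSplitC_ne_nil cs)
    | cons a t => simp [pvSplitC, hp, ih hpre, hc]

lemma pvToks_eq (cs tmp : List Char) (h : ',' ∉ tmp) :
    pvToks cs tmp = ((pvSplitC (tmp ++ pvClean cs)).dropLast).map String.ofList := by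
  induction cs generalizing tmp with
  | nil =>
    have h1 : pvSplitC (tmp ++ pvClean []) = [tmp] := by
      simpa [pvSplitC, pvClean] using pvSplitC_append_no_comma tmp [] h
    simp [pvToks, h1]
  | cons c cs ih =>
    by_cases hsep : c = ',' ∨ c = ']'
    · have hclean : pvClean (c :: cs) = ',' :: pvClean cs := by
        rcases hsep with h' | h' <;> simp [pvClean, h']
      have hm : c ∈ (['"', '\'', ',', '[', ']', ' '] : List Char) := by
        rcases hsep with h' | h' <;> simp [h']
      rw [hclean]
      have hsplit : pvSplitC (tmp ++ ',' :: pvClean cs) = tmp :: pvSplitC (pvClean cs) := by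
        rw [pvSplitC_append_no_comma tmp _ h]
        cases hc : pvSplitC (pvClean cs) with
        | nil => exact absurd hc (pvSplitC_ne_nil _)
        | cons a t => simp [pvSplitC, hc]
      rw [hsplit, List.dropLast_cons_of_ne_nil (pvSplitC_ne_nil _)]
      simp only [pvToks]
      have hsep' : c = ']' ∨ c = ',' := hsep.symm
      simp [hm, hsep', ih [] (by simp)]
    · push_neg at hsep
      obtain ⟨hc1, hc2⟩ := hsep
      have hs : ¬ (c = ']' ∨ c = ',') := by
        intro h'; rcases h' with h' | h' <;> [exact hc2 h'; exact hc1 h']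
      by_cases hm : c ∈ (['"', '\'', ',', '[', ']', ' '] : List Char)
      · have hnoise : pvClean (c :: cs) = pvClean cs := by
          simp at hm
          rcases hm with h' | h' | h' | h' | h' | h' <;> first
            | (exact absurd h' hc1) | (exact absurd h' hc2) | simp [pvClean, h']
        simp only [pvToks]
        rw [hnoise]
        simp [hm, hs, ih tmp h]
      · simp only [List.mem_cons, List.mem_singleton] at hm
        push_neg at hm
        obtain ⟨h1, h2, h3, h4, h5, h6⟩ := hm
        have hclean : pvClean (c :: cs) = c :: pvClean cs := by
          simp [pvClean, h1, h2, h3, h4, h5, h6]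
        simp only [pvToks]
        rw [hclean]
        have h' : ',' ∉ tmp ++ [c] := by
          intro hmem
          rcases List.mem_append.mp hmem with hmem | hmem
          · exact h hmem
          · simp at hmem; exact hc1 hmem.symm
        have hmm : ¬ c ∈ (['"', '\'', ',', '[', ']', ' '] : List Char) := by
          simp [h1, h2, h3, h4, h5, h6]
        simp only [hmm, if_false, if_neg hs]
        simpa [List.append_assoc] using ih (tmp ++ [c]) h'

lemma pvGo (fuel : Nat) (l cur : List Char) (acc : List (List Char)) (h : l.length ≤ fuel) :
    PySem.Chars.splitOn.go [','] fuel l cur acc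
      = acc.reverse ++ (pvSplitC l).modifyHead (cur.reverse ++ ·) := by
  induction fuel generalizing l cur acc with
  | zero =>
    have hl : l = [] := List.eq_nil_of_length_eq_zero (Nat.le_zero.mp h)
    subst hl
    rw [PySem.Chars.splitOn.go.eq_def]
    simp [pvSplitC]
  | succ fuel ih =>
    cases l with
    | nil =>
      rw [PySem.Chars.splitOn.go.eq_def]
      simp [pvSplitC]
    | cons c rest =>
      rw [PySem.Chars.splitOn.go.eq_def]
      simp only [List.length_cons] at h
      by_cases hc : c = ','
      · subst hc
        have hpre : ([','] : List Char).isPrefixOf (',' :: rest) = true := by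
          simp [List.isPrefixOf]
        simp only [hpre, if_true]
        rw [ih (List.drop [','].length (',' :: rest)) [] (cur.reverse :: acc) (by simpa using Nat.le_of_succ_le_succ h)]
        cases hr : pvSplitC rest with
        | nil => exact absurd hr (pvSplitC_ne_nil _)
        | cons a t => simp [pvSplitC, hr]
      · have hpre : ([','] : List Char).isPrefixOf (c :: rest) = false := by
          simp [List.isPrefixOf, Ne.symm hc]
        simp only [hpre, Bool.false_eq_true, if_false]
        rw [ih rest (c :: cur) acc (Nat.le_of_succ_le_succ h)]
        cases hr : pvSplitC rest with
        | nil => exact absurd hr (pvSplitC_ne_nil _)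
        | cons a t => simp [pvSplitC, hc, hr]

lemma pvSplitOn_eq_splitC (cs : List Char) :
    PySem.Chars.splitOn cs [','] = pvSplitC cs := by
  rw [PySem.Chars.splitOn, pvGo cs.length.succ cs [] [] (Nat.le_succ _)]
  cases hr : pvSplitC cs with
  | nil => exact absurd hr (pvSplitC_ne_nil _)
  | cons a t => simp

lemma pvSlice_dropLast {α : Type} (xs : List α) :
    PySem.List.slice xs none (some (-1)) = xs.dropLast := by
  simp [PySem.List.slice]
  rw [← List.dropLast_eq_take]

-- ===== VERDICT (by name: the statement is the Claim_ definition above) =====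
theorem l_form_spec : Claim_equal_l_form := by
  intro strt _
  show l_form strt = l_form_alt strt
  unfold l_form l_form_alt
  have hA := pvA_fold strt.toList [] []
  rw [show (String.ofList [] : String) = "" from rfl] at hA
  simp only [List.nil_append] at hA
  rw [hA, pvToks_eq strt.toList [] (by simp), pvSplitOn_eq_splitC, pvSlice_dropLast]
  simp
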